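-- pv_equiv track=rewrite | github.com/yurmik1/Ylab_tasks | task5.py | count_find_num
-- ===== SOURCE A (Python) =====
-- def count_find_num(primesL, limit):
--     primesL = set(primesL)
--     numbers = []
--     for i in range(limit+1):
--         cur_primesL = set()
--         cur_number = i
--         d = 2
--         while d * d <= i:
--             if i % d == 0:
--                 cur_primesL.add(d)
--                 i //= d
--             else:
--                 d += 1
--         if i > 1:
--             cur_primesL.add(i)
--         if cur_primesL == primesL:
--             numbers.append(cur_number)
--     res = [len(numbers), max(numbers)] if numbers != [] else []
--     return res
-- ===== SOURCE B (Python) =====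
-- def count_find_num(primesL, limit):
--     # B: pre-check the requested primes once; then test each candidate only by
--     # dividing out the given primes (no per-number factorization).
--     primes = sorted(set(primesL))
--     for p in primes:
--         if p < 2:
--             return []
--         d = 2
--         while d * d <= p:
--             if p % d == 0:
--                 return []
--             d += 1
--     count = 0
--     best = 0
--     for i in range(1, limit + 1):
--         r = i
--         ok = True
--         for p in primes:
--             if r % p != 0:
--                 ok = False
--                 break
--             while r % p == 0:
--                 r //= p
--         if ok and r == 1:
--             count += 1
--             best = i
--     return [count, best] if count else []
-- ===== Notes on version B (the rewrite author's own statement) =====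
-- stated objective: faster
-- what changed: Instead of fully factorizing every i in 0..limit by trial division (O(sqrt i) each), B primality-checks the requested prime list once and then tests each candidate only by dividing out those given primes (O(|primes| + log i) each), keeping a running count and maximum instead of building a list; Pre_ excludes empty primesL with limit >= 0, where whether 0 has the empty prime-factor set is an unspecified corner that A and B read differently.
-- outside the precondition, e.g. on count_find_num([], 5): A returns [2, 1], B returns [1, 1]; on count_find_num([], 0): A returns [1, 0], B returns []
import Mathlib
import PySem

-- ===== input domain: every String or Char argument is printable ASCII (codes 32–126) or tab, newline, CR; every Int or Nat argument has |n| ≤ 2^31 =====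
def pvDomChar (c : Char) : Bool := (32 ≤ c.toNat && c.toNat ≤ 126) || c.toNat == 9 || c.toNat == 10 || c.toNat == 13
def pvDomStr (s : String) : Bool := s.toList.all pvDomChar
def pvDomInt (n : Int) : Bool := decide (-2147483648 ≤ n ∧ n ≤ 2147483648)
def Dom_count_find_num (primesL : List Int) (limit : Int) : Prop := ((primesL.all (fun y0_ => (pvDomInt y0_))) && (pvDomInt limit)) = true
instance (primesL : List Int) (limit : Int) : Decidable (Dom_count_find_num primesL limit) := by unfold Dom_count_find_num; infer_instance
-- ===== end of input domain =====

-- B replaces A's per-number trial-division factorization by a one-time primality check of the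
-- requested primes followed by dividing each candidate only by those primes (measured faster).

-- ===== PORT A =====
-- A's inner `while d*d <= i` loop; the fuel argument only makes the recursion structural —
-- on the calls the port makes it exceeds the loop's step count and is never exhausted.
def pvTrial : Nat → Int → Int → PySem.Set Int → Int × PySem.Set Int
  | 0, i, _, acc => (i, acc)
  | f+1, i, d, acc =>
    if d * d ≤ i then
      if PySem.Int.mod i d = 0 then pvTrial f (PySem.Int.floordiv i d) d (PySem.Set.add acc d)
      else pvTrial f i (d+1) acc
    else (i, acc)

-- `if i > 1: cur_primesL.add(i)` applied to the loop's final state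
def pvFin (p : Int × PySem.Set Int) : PySem.Set Int :=
  if 1 < p.1 then PySem.Set.add p.2 p.1 else p.2

-- cur_primesL computed for one i
def pvFactorSet (i : Int) : PySem.Set Int :=
  pvFin (pvTrial (2*i+2).toNat i 2 PySem.Set.empty)

def count_find_num (primesL : List Int) (limit : Int) : List Int :=
  let pset := PySem.Set.ofList primesL
  let numbers := (PySem.List.pyRange 0 (limit+1) 1).foldl
    (fun ns i => if PySem.Set.equal (pvFactorSet i) pset then ns ++ [i] else ns) []
  if numbers ≠ [] then
    [(numbers.length : Int), (PySem.List.max? numbers (fun x => x)).getD 0]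
  else []

-- ===== PORT B =====
-- B's `while d*d <= p` primality loop (fuel only makes it structural, as above)
def pvIsPrimeLoop : Nat → Int → Int → Bool
  | 0, _, _ => true
  | f+1, p, d =>
    if d * d ≤ p then
      if PySem.Int.mod p d = 0 then false else pvIsPrimeLoop f p (d+1)
    else true

-- B's up-front `for p in primes: …` validation (early `return []` = false)
def pvCheckPrimes : List Int → Bool
  | [] => true
  | p :: ps =>
    if p < 2 then false
    else if pvIsPrimeLoop (p+1).toNat p 2 then pvCheckPrimes ps else false

-- B's `while r % p == 0: r //= p`
def pvStrip : Nat → Int → Int → Int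
  | 0, r, _ => r
  | f+1, r, p => if PySem.Int.mod r p = 0 then pvStrip f (PySem.Int.floordiv r p) p else r

-- B's `for p in primes: …` divide-out loop over one candidate, returning (ok, r)
def pvDivideOut : List Int → Int → Bool × Int
  | [], r => (true, r)
  | p :: ps, r =>
    if PySem.Int.mod r p ≠ 0 then (false, r)
    else pvDivideOut ps (pvStrip (r+1).toNat r p)

def count_find_num_alt (primesL : List Int) (limit : Int) : List Int :=
  let primes := PySem.List.sorted (PySem.Set.ofList primesL) (fun x => x) false
  if pvCheckPrimes primes then
    let cb := (PySem.List.pyRange 1 (limit+1) 1).foldl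
      (fun cb i =>
        if (pvDivideOut primes i).1 = true ∧ (pvDivideOut primes i).2 = 1
        then (cb.1 + 1, i) else cb) ((0 : Int), (0 : Int))
    if cb.1 ≠ 0 then [cb.1, cb.2] else []
  else []

-- ===== PRECONDITION & SPEC =====
-- Pre_ excludes empty primesL with limit ≥ 0: there A returns [2,1] ([1,0] for limit = 0)
-- because its trial-division loop gives 0 (as well as 1) the empty prime-factor set, while B
-- counts only 1 and returns [1,1] ([]) — both defensible readings of an unspecified corner.
def Pre_count_find_num (primesL : List Int) (limit : Int) : Prop := primesL ≠ [] ∨ limit < 0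
instance (primesL : List Int) (limit : Int) : Decidable (Pre_count_find_num primesL limit) := by
  unfold Pre_count_find_num; infer_instance

def pvWitness_count_find_num : List Int × Int := ([2, 3], 10)

def Spec_count_find_num (primesL : List Int) (limit : Int) (out : List Int) : Prop :=
  out = count_find_num_alt primesL limit
instance (primesL : List Int) (limit : Int) (out : List Int) : Decidable (Spec_count_find_num primesL limit out) := by unfold Spec_count_find_num; infer_instance

-- ===== CLAIM (what is proved, stated in full; the proofs are below) =====
def Claim_equal_count_find_num : Prop := ∀ (primesL : List Int) (limit : Int), Dom_count_find_num primesL limit → Pre_count_find_num primesL limit → Spec_count_find_num primesL limit (count_find_num primesL limit)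

-- ===== LEMMAS AND PROOFS =====

-- `q` behaves as a prime in both programs' sense: ≥ 2 with no divisor in [2, q)
def IsP (q : Int) : Prop := 2 ≤ q ∧ ∀ a : Int, 2 ≤ a → a < q → ¬ a ∣ q

-- a proper divisor yields a divisor at most the square root
lemma small_divisor {i q : Int} (hi : 2 ≤ i) (hq2 : 2 ≤ q) (hqi : q < i) (hd : q ∣ i) :
    ∃ m, 2 ≤ m ∧ m ∣ i ∧ m * m ≤ i := by
  obtain ⟨e, he⟩ := hd
  have he1 : 1 ≤ e := by
    by_contra h
    have h0 : e ≤ 0 := by omega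
    have : q * e ≤ 0 := mul_nonpos_of_nonneg_of_nonpos (by omega) h0
    omega
  have he2 : 2 ≤ e := by
    by_contra h
    have he' : e = 1 := by omega
    rw [he', mul_one] at he
    omega
  by_cases h : q * q ≤ i
  · exact ⟨q, hq2, ⟨e, he⟩, h⟩
  · rw [not_le] at h
    refine ⟨e, he2, ⟨q, by rw [he]; ring⟩, ?_⟩
    have heq : e < q := by nlinarith
    nlinarith

lemma isP_of_no_small {i : Int} (h2 : 2 ≤ i)
    (h : ∀ a, 2 ≤ a → a * a ≤ i → ¬ a ∣ i) : IsP i := by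
  refine ⟨h2, fun a ha2 hai hdvd => ?_⟩
  obtain ⟨m, hm2, hmd, hmm⟩ := small_divisor h2 ha2 hai hdvd
  exact h m hm2 hmm hmd

lemma isP_iff_prime {q : Int} : IsP q ↔ Prime q ∧ 2 ≤ q := by
  constructor
  · rintro ⟨h2, hdiv⟩
    refine ⟨?_, h2⟩
    rw [Int.prime_iff_natAbs_prime, Nat.prime_def_lt]
    refine ⟨by omega, fun m hm hmd => ?_⟩
    by_contra hm1
    have hm2 : 2 ≤ m := by
      rcases Nat.eq_zero_or_pos m with h0 | h0
      · subst h0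
        have := Nat.eq_zero_of_zero_dvd hmd
        omega
      · omega
    have hdq : (m : Int) ∣ q := by
      have := Int.natCast_dvd_natCast.mpr hmd
      rwa [Int.natAbs_of_nonneg (by omega)] at this
    exact hdiv m (by exact_mod_cast hm2) (by omega) hdq
  · rintro ⟨hp, h2⟩
    refine ⟨h2, fun a ha2 haq hdvd => ?_⟩
    have h1 : a.natAbs ∣ q.natAbs := Int.natAbs_dvd_natAbs.mpr hdvd
    have hqp : Nat.Prime q.natAbs := Int.prime_iff_natAbs_prime.mp hp
    rcases hqp.eq_one_or_self_of_dvd _ h1 with h | h <;> omega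

lemma isP_dvd_isP {p q : Int} (hp : IsP p) (hq : IsP q) (h : p ∣ q) : p = q := by
  have hp2 := hp.1
  have hq2 := hq.1
  have hpq := Int.natAbs_dvd_natAbs.mpr h
  have hp' := Int.prime_iff_natAbs_prime.mp (isP_iff_prime.mp hp).1
  have hq' := Int.prime_iff_natAbs_prime.mp (isP_iff_prime.mp hq).1
  have := (Nat.prime_dvd_prime_iff_eq hp' hq').mp hpq
  omega

lemma exists_isP_dvd {n : Int} (h : 2 ≤ n) : ∃ p, IsP p ∧ p ∣ n := by
  have h1 : n.natAbs ≠ 1 := by omega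
  obtain ⟨p, hp, hpd⟩ := Nat.exists_prime_and_dvd h1
  refine ⟨(p : Int), ?_, ?_⟩
  · rw [isP_iff_prime]
    refine ⟨?_, by exact_mod_cast hp.two_le⟩
    rw [Int.prime_iff_natAbs_prime]
    simpa using hp
  · have := Int.natCast_dvd_natCast.mpr hpd
    rwa [Int.natAbs_of_nonneg (by omega)] at this

-- characterization of A's factor-set loop
lemma pvTrial_spec : ∀ (fuel : Nat) (i d : Int) (acc : PySem.Set Int), 1 ≤ i → 2 ≤ d →
    (∀ k : Int, 2 ≤ k → k < d → ¬ k ∣ i) → (2*i - d).toNat < fuel →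
    ∀ q : Int, q ∈ pvFin (pvTrial fuel i d acc) ↔ q ∈ acc ∨ (IsP q ∧ q ∣ i) := by
  intro fuel
  induction fuel with
  | zero => intro i d acc _ _ _ hf; omega
  | succ f ih =>
    intro i d acc hi hd hinv hf q
    simp only [pvTrial]
    by_cases hdd : d * d ≤ i
    · have hdlei : d ≤ i := le_trans (le_mul_of_one_le_left (by omega) (by omega)) hdd
      rw [if_pos hdd]
      by_cases hm : PySem.Int.mod i d = 0
      · rw [if_pos hm]
        have hdvd : d ∣ i := (PySem.Int.mod_eq_zero_iff_dvd i d).mp hm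
        have hdpos : (0 : Int) < d := by omega
        rw [PySem.Int.floordiv_eq_ediv_of_pos hdpos]
        have hii' : d * (i / d) = i := Int.mul_ediv_cancel' hdvd
        have hi'1 : 1 ≤ i / d := by
          by_contra h
          have h0 : i / d ≤ 0 := by omega
          have : d * (i / d) ≤ 0 := mul_nonpos_of_nonneg_of_nonpos (by omega) h0
          omega
        have hi'lt : i / d < i := by nlinarith
        have hIsPd : IsP d :=
          ⟨by omega, fun a ha2 had hadvd => hinv a ha2 had (dvd_trans hadvd hdvd)⟩
        have hi'dvd : i / d ∣ i := ⟨d, by rw [mul_comm]; exact hii'.symm⟩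
        have hinv' : ∀ k : Int, 2 ≤ k → k < d → ¬ k ∣ (i / d) :=
          fun k hk2 hkd hkdvd => hinv k hk2 hkd (dvd_trans hkdvd hi'dvd)
        rw [ih (i / d) d (PySem.Set.add acc d) hi'1 hd hinv' (by omega)]
        rw [PySem.Set.mem_add]
        constructor
        · rintro ((h | rfl) | ⟨hq, hqd⟩)
          · exact Or.inl h
          · exact Or.inr ⟨hIsPd, hdvd⟩
          · exact Or.inr ⟨hq, dvd_trans hqd hi'dvd⟩
        · rintro (h | ⟨hq, hqd⟩)
          · exact Or.inl (Or.inl h)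
          · by_cases hqeq : q = d
            · exact Or.inl (Or.inr hqeq)
            · refine Or.inr ⟨hq, ?_⟩
              have hqprime : Prime q := (isP_iff_prime.mp hq).1
              have : q ∣ d * (i / d) := by rw [hii']; exact hqd
              rcases (hqprime.dvd_mul).mp this with h | h
              · exact absurd (isP_dvd_isP hq hIsPd h) hqeq
              · exact h
      · rw [if_neg hm]
        have hnd : ¬ d ∣ i := fun h => hm ((PySem.Int.mod_eq_zero_iff_dvd i d).mpr h)
        have hinv' : ∀ k : Int, 2 ≤ k → k < d + 1 → ¬ k ∣ i := by
          intro k hk2 hkd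
          rcases eq_or_lt_of_le (by omega : k ≤ d) with rfl | h
          · exact hnd
          · exact hinv k hk2 h
        exact ih i (d+1) acc hi (by omega) hinv' (by omega) q
    · rw [if_neg hdd]
      unfold pvFin
      by_cases hone : (1 : Int) < i
      · simp only [if_pos hone]
        have hIsPi : IsP i := by
          refine isP_of_no_small (by omega) (fun a ha2 haa hdvd => ?_)
          have had : a < d := by nlinarith
          exact hinv a ha2 had hdvd
        rw [PySem.Set.mem_add]
        constructor
        · rintro (h | rfl)
          · exact Or.inl h
          · exact Or.inr ⟨hIsPi, dvd_refl _⟩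
        · rintro (h | ⟨hq, hqd⟩)
          · exact Or.inl h
          · refine Or.inr ?_
            by_contra hne
            have hqle : q ≤ i := Int.le_of_dvd (by omega) hqd
            have hqlt : q < i := by
              rcases eq_or_lt_of_le hqle with rfl | h
              · exact absurd rfl hne
              · exact h
            obtain ⟨m, hm2, hmd, hmm⟩ := small_divisor (by omega) hq.1 hqlt hqd
            have : m < d := by nlinarith
            exact hinv m hm2 this hmd
      · simp only [if_neg hone]
        have hi1 : i = 1 := by omega
        subst hi1
        constructor
        · exact Or.inl
        · rintro (h | ⟨hq, hqd⟩)
          · exact h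
          · have := Int.le_of_dvd (by omega) hqd
            have := hq.1
            omega

lemma pvFactorSet_mem {i : Int} (hi : 1 ≤ i) (q : Int) :
    q ∈ pvFactorSet i ↔ IsP q ∧ q ∣ i := by
  unfold pvFactorSet
  rw [pvTrial_spec ((2*i+2).toNat) i 2 PySem.Set.empty hi (by omega)
    (fun k hk2 hkd _ => by omega) (by omega) q]
  constructor
  · rintro (h | h)
    · exact absurd h (List.not_mem_nil)
    · exact h
  · exact Or.inr

lemma pvFactorSet_zero : pvFactorSet 0 = [] := by decide

-- characterization of B's primality loop
lemma pvIsPrimeLoop_spec : ∀ (fuel : Nat) (p d : Int), 2 ≤ d → (p - d).toNat < fuel →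
    (pvIsPrimeLoop fuel p d = true ↔ ∀ a : Int, d ≤ a → a * a ≤ p → ¬ a ∣ p) := by
  intro fuel
  induction fuel with
  | zero => intro p d _ hf; omega
  | succ f ih =>
    intro p d hd hf
    simp only [pvIsPrimeLoop]
    by_cases hdd : d * d ≤ p
    · rw [if_pos hdd]
      have h2d : 2 * d ≤ d * d := by nlinarith
      by_cases hm : PySem.Int.mod p d = 0
      · rw [if_pos hm]
        have hdvd : d ∣ p := (PySem.Int.mod_eq_zero_iff_dvd p d).mp hm
        constructor
        · intro h; exact absurd h (by simp)
        · intro h; exact absurd hdvd (h d le_rfl hdd)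
      · rw [if_neg hm]
        have hnd : ¬ d ∣ p := fun h => hm ((PySem.Int.mod_eq_zero_iff_dvd p d).mpr h)
        rw [ih p (d+1) (by omega) (by omega)]
        constructor
        · intro h a ha haa
          rcases eq_or_lt_of_le ha with rfl | h'
          · exact hnd
          · exact h a (by omega) haa
        · intro h a ha haa
          exact h a (by omega) haa
    · rw [if_neg hdd]
      simp only [true_iff]
      intro a ha haa hdvd
      nlinarith

lemma pvCheckPrimes_spec (ps : List Int) :
    pvCheckPrimes ps = true ↔ ∀ p ∈ ps, IsP p := by
  induction ps with
  | nil => simp [pvCheckPrimes]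
  | cons p t ih =>
    simp only [pvCheckPrimes, List.mem_cons]
    by_cases h2 : p < 2
    · rw [if_pos h2]
      constructor
      · intro h; exact absurd h (by simp)
      · intro h
        have := (h p (Or.inl rfl)).1
        omega
    · rw [if_neg h2]
      have hspec := pvIsPrimeLoop_spec (p+1).toNat p 2 (by omega) (by omega)
      by_cases hl : pvIsPrimeLoop (p+1).toNat p 2 = true
      · rw [if_pos hl, ih]
        have hPp : IsP p :=
          isP_of_no_small (by omega) (fun a ha2 haa => hspec.mp hl a ha2 haa)
        constructor
        · intro h q hq
          rcases hq with rfl | hq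
          · exact hPp
          · exact h q hq
        · intro h q hq
          exact h q (Or.inr hq)
      · rw [if_neg hl]
        constructor
        · intro h; exact absurd h (by simp)
        · intro h
          exfalso
          apply hl
          rw [hspec]
          intro a ha haa hdvd
          have ha2 : 2 ≤ a := ha
          have hap : a < p := by nlinarith
          exact (h p (Or.inl rfl)).2 a ha2 hap hdvd

-- characterization of B's strip loop
lemma pvStrip_spec : ∀ (fuel : Nat) (r p : Int), 1 ≤ r → 2 ≤ p → r.toNat < fuel →
    ∃ k : Nat, r = p ^ k * (pvStrip fuel r p) ∧ ¬ p ∣ (pvStrip fuel r p) ∧ 1 ≤ pvStrip fuel r p := by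
  intro fuel
  induction fuel with
  | zero => intro r p hr _ hf; omega
  | succ f ih =>
    intro r p hr hp hf
    simp only [pvStrip]
    by_cases hm : PySem.Int.mod r p = 0
    · rw [if_pos hm]
      have hdvd : p ∣ r := (PySem.Int.mod_eq_zero_iff_dvd r p).mp hm
      have hppos : (0 : Int) < p := by omega
      rw [PySem.Int.floordiv_eq_ediv_of_pos hppos]
      have hrr : p * (r / p) = r := Int.mul_ediv_cancel' hdvd
      have hr1 : 1 ≤ r / p := by
        by_contra h
        have h0 : r / p ≤ 0 := by omega
        have : p * (r / p) ≤ 0 := mul_nonpos_of_nonneg_of_nonpos (by omega) h0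
        omega
      have hlt : r / p < r := by nlinarith
      obtain ⟨k, hk1, hk2, hk3⟩ := ih (r / p) p hr1 hp (by omega)
      refine ⟨k + 1, ?_, hk2, hk3⟩
      conv_lhs => rw [← hrr, hk1]
      ring
    · rw [if_neg hm]
      exact ⟨0, by ring, fun h => hm ((PySem.Int.mod_eq_zero_iff_dvd r p).mpr h), hr⟩

-- characterization of B's divide-out loop
lemma pvDivideOut_spec : ∀ (ps : List Int) (i : Int), 1 ≤ i → (∀ p ∈ ps, IsP p) → ps.Nodup →
    1 ≤ (pvDivideOut ps i).2 ∧
    ((pvDivideOut ps i).1 = true →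
      (∀ p ∈ ps, p ∣ i) ∧ (∀ q, IsP q → (q ∣ (pvDivideOut ps i).2 ↔ (q ∣ i ∧ q ∉ ps)))) ∧
    ((pvDivideOut ps i).1 = false → ∃ p ∈ ps, ¬ p ∣ i) := by
  intro ps
  induction ps with
  | nil =>
    intro i hi _ _
    refine ⟨hi, fun _ => ⟨by simp, fun q _ => by simp [pvDivideOut]⟩, by simp [pvDivideOut]⟩
  | cons p t ih =>
    intro i hi hP hnd
    have hPp : IsP p := hP p (List.mem_cons_self ..)
    have hp2 : 2 ≤ p := hPp.1
    simp only [pvDivideOut]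
    by_cases hm : PySem.Int.mod i p = 0
    · rw [if_neg (by simp [hm])]
      obtain ⟨k, hk, hknd, hk1⟩ := pvStrip_spec (i+1).toNat i p hi hp2 (by omega)
      set r1 := pvStrip (i+1).toNat i p with hr1def
      have hpdvd : p ∣ i := (PySem.Int.mod_eq_zero_iff_dvd i p).mp hm
      have hr1dvd : r1 ∣ i := ⟨p ^ k, by rw [hk]; ring⟩
      have hkey : ∀ q, IsP q → (q ∣ r1 ↔ (q ∣ i ∧ q ≠ p)) := by
        intro q hq
        constructor
        · intro hqr
          refine ⟨dvd_trans hqr hr1dvd, ?_⟩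
          rintro rfl
          exact hknd hqr
        · rintro ⟨hqi, hqp⟩
          have hqprime : Prime q := (isP_iff_prime.mp hq).1
          have : q ∣ p ^ k * r1 := by rw [← hk]; exact hqi
          rcases hqprime.dvd_mul.mp this with h | h
          · exact absurd (isP_dvd_isP hq hPp (hqprime.dvd_of_dvd_pow h)) hqp
          · exact h
      have hPt : ∀ p' ∈ t, IsP p' := fun p' hp' => hP p' (List.mem_cons_of_mem _ hp')
      have hndt : t.Nodup := (List.nodup_cons.mp hnd).2
      have hpnott : p ∉ t := (List.nodup_cons.mp hnd).1
      obtain ⟨ihr, ihtrue, ihfalse⟩ := ih r1 hk1 hPt hndt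
      refine ⟨ihr, ?_, ?_⟩
      · intro hok
        obtain ⟨hall, hiff⟩ := ihtrue hok
        constructor
        · intro p' hp'
          rcases List.mem_cons.mp hp' with rfl | hp'
          · exact hpdvd
          · exact dvd_trans (hall p' hp') hr1dvd
        · intro q hq
          rw [hiff q hq, hkey q hq, List.mem_cons]
          tauto
      · intro hfalse'
        obtain ⟨p', hp't, hp'nd⟩ := ihfalse hfalse'
        refine ⟨p', List.mem_cons_of_mem _ hp't, fun h => hp'nd ?_⟩
        rw [hkey p' (hPt p' hp't)]
        refine ⟨h, ?_⟩
        rintro rfl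
        exact hpnott hp't
    · rw [if_pos (by simp [hm])]
      have hnd' : ¬ p ∣ i := fun h => hm ((PySem.Int.mod_eq_zero_iff_dvd i p).mpr h)
      exact ⟨hi, fun h => absurd h (by simp), fun _ => ⟨p, List.mem_cons_self .., hnd'⟩⟩

-- B accepts i iff i's prime support is exactly ps
lemma pvDivideOut_accept (ps : List Int) (i : Int) (hi : 1 ≤ i)
    (hP : ∀ p ∈ ps, IsP p) (hnd : ps.Nodup) :
    ((pvDivideOut ps i).1 = true ∧ (pvDivideOut ps i).2 = 1) ↔
      ((∀ p ∈ ps, p ∣ i) ∧ (∀ q, IsP q → q ∣ i → q ∈ ps)) := by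
  obtain ⟨hr, htrue, hfalse⟩ := pvDivideOut_spec ps i hi hP hnd
  constructor
  · rintro ⟨hok, hone⟩
    obtain ⟨hall, hiff⟩ := htrue hok
    refine ⟨hall, fun q hq hqi => ?_⟩
    by_contra hqn
    have : q ∣ (pvDivideOut ps i).2 := (hiff q hq).mpr ⟨hqi, hqn⟩
    rw [hone] at this
    have := Int.le_of_dvd one_pos this
    have := hq.1
    omega
  · rintro ⟨hall, hsupp⟩
    have hok : (pvDivideOut ps i).1 = true := by
      cases h : (pvDivideOut ps i).1
      · obtain ⟨p, hp, hpnd⟩ := hfalse h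
        exact absurd (hall p hp) hpnd
      · rfl
    obtain ⟨_, hiff⟩ := htrue hok
    refine ⟨hok, ?_⟩
    by_contra hne
    have h2 : 2 ≤ (pvDivideOut ps i).2 := by omega
    obtain ⟨q, hq, hqd⟩ := exists_isP_dvd h2
    obtain ⟨hqi, hqn⟩ := (hiff q hq).mp hqd
    exact hqn (hsupp q hq hqi)

-- B's counting fold computes (count, last) of the filtered list
lemma pvB_fold (primes : List Int) : ∀ (l : List Int) (n b : Int),
    l.foldl (fun cb i =>
        if (pvDivideOut primes i).1 = true ∧ (pvDivideOut primes i).2 = 1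
        then (cb.1 + 1, i) else cb) (n, b) =
      (n + ((l.filter (fun i => decide ((pvDivideOut primes i).1 = true ∧ (pvDivideOut primes i).2 = 1))).length : Int),
       ((l.filter (fun i => decide ((pvDivideOut primes i).1 = true ∧ (pvDivideOut primes i).2 = 1))).getLast?).getD b) := by
  intro l
  induction l with
  | nil => intro n b; simp
  | cons x t ih =>
    intro n b
    by_cases h : (pvDivideOut primes x).1 = true ∧ (pvDivideOut primes x).2 = 1
    · have hfil : List.filter (fun i => decide ((pvDivideOut primes i).1 = true ∧ (pvDivideOut primes i).2 = 1)) (x :: t)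
          = x :: List.filter (fun i => decide ((pvDivideOut primes i).1 = true ∧ (pvDivideOut primes i).2 = 1)) t := by
        simp [h]
      rw [List.foldl_cons, if_pos h, ih, hfil, List.getLast?_cons]
      simp only [Option.getD_some, List.length_cons]
      exact Prod.ext (by push_cast; ring) rfl
    · have hfil : List.filter (fun i => decide ((pvDivideOut primes i).1 = true ∧ (pvDivideOut primes i).2 = 1)) (x :: t)
          = List.filter (fun i => decide ((pvDivideOut primes i).1 = true ∧ (pvDivideOut primes i).2 = 1)) t := by
        simp [h]
      rw [List.foldl_cons, if_neg h, ih, hfil]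

-- on a strictly increasing list, Python's max is the last element
lemma max_eq_getLast {l : List Int} (hne : l ≠ []) (hp : l.Pairwise (· < ·)) :
    (PySem.List.max? l (fun x => x)).getD 0 = (l.getLast?).getD 0 := by
  have key : ∀ (L : List Int) (a : Int), (a :: L).Pairwise (· < ·) →
      ∀ y ∈ a :: L, y ≤ ((a :: L).getLast?).getD 0 := by
    intro L
    induction L with
    | nil => intro a _ y hy; simp at hy; simp [hy]
    | cons b t iht =>
      intro a hpw y hy
      have hab : a < b := (List.pairwise_cons.mp hpw).1 b (List.mem_cons_self ..)
      have hpw' : (b :: t).Pairwise (· < ·) := (List.pairwise_cons.mp hpw).2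
      rw [List.getLast?_cons_cons]
      rcases List.mem_cons.mp hy with rfl | hy'
      · have := iht b hpw' b (List.mem_cons_self ..)
        omega
      · exact iht b hpw' y hy'
  rcases hmax : PySem.List.max? l (fun x => x) with _ | m
  · exact absurd ((PySem.List.max?_eq_none_iff _ _).mp hmax) hne
  rcases l with _ | ⟨a, t⟩
  · exact absurd rfl hne
  have hm_mem : m ∈ a :: t := PySem.List.max?_mem hmax
  have h1 : m ≤ ((a :: t).getLast?).getD 0 := key t a hp m hm_mem
  have hglmem : ∀ (t : List Int) (a : Int), (t.getLast?).getD a ∈ a :: t := by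
    intro t
    induction t with
    | nil => intro a; simp
    | cons b t' iht =>
      intro a
      rw [List.getLast?_cons, Option.getD_some]
      exact List.mem_cons_of_mem _ (iht b)
  have h2 : ((a :: t).getLast?).getD 0 ≤ m := by
    have hmem' : ((a :: t).getLast?).getD 0 ∈ a :: t := by
      rw [List.getLast?_cons, Option.getD_some]
      exact hglmem t a
    exact PySem.List.max?_isMax hmax _ hmem'
  simp only [Option.getD_some]
  omega

-- the two acceptance tests agree for i ≥ 1 when every requested prime passes B's check
lemma accept_agree (primesL : List Int) (i : Int) (hi : 1 ≤ i)
    (hP : ∀ p ∈ PySem.List.sorted (PySem.Set.ofList primesL) (fun x => x) false, IsP p) :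
    (PySem.Set.equal (pvFactorSet i) (PySem.Set.ofList primesL) = true ↔
      ((pvDivideOut (PySem.List.sorted (PySem.Set.ofList primesL) (fun x => x) false) i).1 = true ∧
       (pvDivideOut (PySem.List.sorted (PySem.Set.ofList primesL) (fun x => x) false) i).2 = 1)) := by
  set primes := PySem.List.sorted (PySem.Set.ofList primesL) (fun x => x) false with hpr
  have hmem : ∀ x : Int, x ∈ primes ↔ x ∈ PySem.Set.ofList primesL := by
    intro x
    rw [hpr, PySem.List.mem_sorted]
  have hnd : primes.Nodup := by
    rw [hpr]
    exact ((PySem.List.sorted_perm _ _ _).nodup_iff).mpr (PySem.Set.nodup_ofList _)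
  rw [PySem.Set.equal_iff, pvDivideOut_accept primes i hi hP hnd]
  constructor
  · intro h
    constructor
    · intro p hp
      have := (h p).mpr ((hmem p).mp hp)
      exact ((pvFactorSet_mem hi p).mp this).2
    · intro q hq hqi
      rw [hmem]
      exact (h q).mp ((pvFactorSet_mem hi q).mpr ⟨hq, hqi⟩)
  · rintro ⟨h1, h2⟩ x
    rw [pvFactorSet_mem hi x]
    constructor
    · rintro ⟨hx, hxi⟩
      rw [← hmem]
      exact h2 x hx hxi
    · intro hx
      rw [← hmem] at hx
      exact ⟨hP x hx, h1 x hx⟩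

-- A's numbers list is the filtered range
lemma pvA_numbers (primesL : List Int) (limit : Int) :
    count_find_num primesL limit =
      (if List.filter (fun i => PySem.Set.equal (pvFactorSet i) (PySem.Set.ofList primesL)) (PySem.List.pyRange 0 (limit+1) 1) ≠ [] then
        [((List.filter (fun i => PySem.Set.equal (pvFactorSet i) (PySem.Set.ofList primesL)) (PySem.List.pyRange 0 (limit+1) 1)).length : Int),
         (PySem.List.max? (List.filter (fun i => PySem.Set.equal (pvFactorSet i) (PySem.Set.ofList primesL)) (PySem.List.pyRange 0 (limit+1) 1)) (fun x => x)).getD 0]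
       else []) := by
  simp only [count_find_num]
  rw [PySem.List.foldl_append_if
    (fun i => PySem.Set.equal (pvFactorSet i) (PySem.Set.ofList primesL)) (fun x => x)]
  simp only [List.nil_append, show (fun (x : Int) => x) = id from rfl, List.map_id]

-- B unfolded through its counting fold
lemma pvB_value (primesL : List Int) (limit : Int) :
    count_find_num_alt primesL limit =
      (if pvCheckPrimes (PySem.List.sorted (PySem.Set.ofList primesL) (fun x => x) false) then
        (if (0 : Int) + (((PySem.List.pyRange 1 (limit+1) 1).filter
              (fun i => decide ((pvDivideOut (PySem.List.sorted (PySem.Set.ofList primesL) (fun x => x) false) i).1 = true ∧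
                 (pvDivideOut (PySem.List.sorted (PySem.Set.ofList primesL) (fun x => x) false) i).2 = 1))).length : Int) ≠ 0 then
          [(0 : Int) + (((PySem.List.pyRange 1 (limit+1) 1).filter
              (fun i => decide ((pvDivideOut (PySem.List.sorted (PySem.Set.ofList primesL) (fun x => x) false) i).1 = true ∧
                 (pvDivideOut (PySem.List.sorted (PySem.Set.ofList primesL) (fun x => x) false) i).2 = 1))).length : Int),
           (((PySem.List.pyRange 1 (limit+1) 1).filter
              (fun i => decide ((pvDivideOut (PySem.List.sorted (PySem.Set.ofList primesL) (fun x => x) false) i).1 = true ∧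
                 (pvDivideOut (PySem.List.sorted (PySem.Set.ofList primesL) (fun x => x) false) i).2 = 1))).getLast?).getD 0]
         else [])
       else []) := by
  simp only [count_find_num_alt]
  rw [pvB_fold]

-- ===== VERDICT (by name: the statement is the Claim_ definition above) =====
theorem count_find_num_spec : Claim_equal_count_find_num := by
  intro primesL limit _ hPre
  have hnD : ¬ (primesL = [] ∧ 0 ≤ limit) := by
    rcases hPre with h | h
    · exact fun hc => h hc.1
    · exact fun hc => by omega
  show count_find_num primesL limit = count_find_num_alt primesL limit
  rw [pvA_numbers, pvB_value]
  set primes := PySem.List.sorted (PySem.Set.ofList primesL) (fun x => x) false with hpr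
  by_cases hcp : pvCheckPrimes primes = true
  · have hP : ∀ p ∈ primes, IsP p := (pvCheckPrimes_spec primes).mp hcp
    rw [if_pos hcp]
    by_cases hlim : limit < 0
    · -- both ranges empty
      rw [PySem.List.pyRange_one_eq_nil (by omega : limit + 1 ≤ 0),
          PySem.List.pyRange_one_eq_nil (by omega : limit + 1 ≤ 1)]
      simp
    · -- limit ≥ 0, so primesL ≠ []
      have hlim' : (0 : Int) ≤ limit := by omega
      have hnil : primesL ≠ [] := by
        intro h
        exact hnD ⟨h, hlim'⟩
      -- A's filter over [0..limit] equals B's filter over [1..limit]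
      have hc0 : PySem.Set.equal (pvFactorSet 0) (PySem.Set.ofList primesL) = false := by
        rw [Bool.eq_false_iff]
        intro h
        rcases primesL with _ | ⟨y, ys⟩
        · exact hnil rfl
        have hy : y ∈ PySem.Set.ofList (y :: ys) :=
          (PySem.Set.mem_ofList _ _).mpr (List.mem_cons_self ..)
        have := ((PySem.Set.equal_iff _ _).mp h y).mpr hy
        rw [pvFactorSet_zero] at this
        exact List.not_mem_nil this
      have hsplit : PySem.List.pyRange 0 (limit+1) 1 = 0 :: PySem.List.pyRange 1 (limit+1) 1 := by
        have := PySem.List.pyRange_one_cons (a := 0) (b := limit + 1) (by omega)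
        simpa using this
      rw [hsplit, List.filter_cons_of_neg (by simp [hc0])]
      have hfeq : List.filter (fun i => PySem.Set.equal (pvFactorSet i) (PySem.Set.ofList primesL)) (PySem.List.pyRange 1 (limit+1) 1)
          = List.filter (fun i => decide ((pvDivideOut primes i).1 = true ∧ (pvDivideOut primes i).2 = 1)) (PySem.List.pyRange 1 (limit+1) 1) := by
        apply List.filter_congr
        intro i hi
        have hi1 : 1 ≤ i := ((PySem.List.mem_pyRange_one).mp hi).1
        have := accept_agree primesL i hi1 hP
        rw [Bool.eq_iff_iff, this, decide_eq_true_eq]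
      rw [hfeq]
      set F := List.filter (fun i => decide ((pvDivideOut primes i).1 = true ∧ (pvDivideOut primes i).2 = 1)) (PySem.List.pyRange 1 (limit+1) 1) with hF
      have hFpw : F.Pairwise (· < ·) :=
        (PySem.List.pairwise_lt_pyRange_one 1 (limit+1)).filter _
      by_cases hFe : F = []
      · simp [hFe]
      · have hlen : F.length ≠ 0 := fun h => hFe (List.length_eq_zero_iff.mp h)
        rw [if_pos (by simpa using hFe), if_pos (by omega)]
        rw [max_eq_getLast hFe hFpw]
        simp
  · rw [if_neg hcp]
    -- some requested value is not prime: A matches nothing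
    rw [pvCheckPrimes_spec] at hcp
    push_neg at hcp
    obtain ⟨p0, hp0mem, hp0⟩ := hcp
    have hnum : List.filter (fun i => PySem.Set.equal (pvFactorSet i) (PySem.Set.ofList primesL)) (PySem.List.pyRange 0 (limit+1) 1) = [] := by
      rw [List.filter_eq_nil_iff]
      intro i hi h
      have hi0 : 0 ≤ i := ((PySem.List.mem_pyRange_one).mp hi).1
      have hp0L : p0 ∈ PySem.Set.ofList primesL := (PySem.List.mem_sorted _ _ _ _).mp hp0mem
      have hmemf : p0 ∈ pvFactorSet i := ((PySem.Set.equal_iff _ _).mp h p0).mpr hp0L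
      rcases eq_or_lt_of_le hi0 with rfl | hi1
      · rw [pvFactorSet_zero] at hmemf
        exact List.not_mem_nil hmemf
      · exact hp0 ((pvFactorSet_mem (by omega) p0).mp hmemf).1
    simp [hnum]
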